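-- pv_equiv track=rewrite | github.com/yeongkyo1997/Algorithm | 백준/Bronze/2775. 부녀회장이 될테야/부녀회장이 될테야.py | solve
-- ===== SOURCE A (Python) =====
-- def solve(K, N):
--     arr = [0] * (N + 1)
--     SUM = 0
--
--     if K == 1:
--         SUM += sum(range(1, N + 1))
--     else:
--         for j in range(0, N + 1):
--             arr[N - j] = 1 + j
--
--         for j in range(2, K):
--             for k in range(1, N):
--                 arr[N - k] += arr[N - k + 1]
--
--         for j in range(0, N + 1):
--             SUM += arr[j] * j
--
--     return SUM
-- ===== SOURCE B (Python) =====
-- def solve(K, N):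
--     # Closed form: the answer is a single binomial coefficient C(N+m+2, m+3)
--     # with m = K-2 passes (m = 0 when K <= 2), computed in O(min(K, N)) exact steps.
--     if N <= 0:
--         return 0
--     if K == 1:
--         return N * (N + 1) // 2
--     m = K - 2 if K > 2 else 0
--     n = N + m + 2
--     k = m + 3 if m + 3 < N - 1 else N - 1
--     r = 1
--     for i in range(k):
--         r = r * (n - k + 1 + i) // (i + 1)
--     return r
-- ===== Notes on version B (the rewrite author's own statement) =====
-- stated objective: faster
-- what changed: Replaces A's (K-2)-fold in-place prefix-sum accumulation over an (N+1)-length table plus a weighted final pass by the closed-form single binomial coefficient C(N+m+2, m+3) (m = max(K-2,0)), computed with one exact-product loop of min(K+1, N-1) steps.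
import Mathlib
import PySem

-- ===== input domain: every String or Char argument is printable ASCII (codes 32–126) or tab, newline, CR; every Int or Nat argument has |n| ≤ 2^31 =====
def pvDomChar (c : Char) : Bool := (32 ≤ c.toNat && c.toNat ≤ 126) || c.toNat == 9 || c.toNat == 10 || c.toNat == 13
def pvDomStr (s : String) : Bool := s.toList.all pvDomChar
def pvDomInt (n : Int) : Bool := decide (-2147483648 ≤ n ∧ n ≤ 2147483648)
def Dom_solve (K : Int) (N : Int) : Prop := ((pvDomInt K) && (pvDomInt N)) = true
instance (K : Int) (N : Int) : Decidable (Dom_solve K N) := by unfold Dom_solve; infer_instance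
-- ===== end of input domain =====

-- B replaces A's (K-2)-fold in-place accumulation table by a single closed-form binomial
-- coefficient C(N+m+2, m+3) computed with one short exact-product loop (objective: faster).

-- ===== PORT A =====
def solve (K : Int) (N : Int) : Int :=
  let arr : List Int := List.replicate (N + 1).toNat 0
  let SUM : Int := 0
  if K = 1 then
    SUM + (PySem.List.pyRange 1 (N + 1) 1).foldl (· + ·) 0
  else
    let arr := (PySem.List.pyRange 0 (N + 1) 1).foldl
      (fun a j => PySem.List.pySetD a (N - j) (1 + j)) arr
    let arr := (PySem.List.pyRange 2 K 1).foldl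
      (fun a _j => (PySem.List.pyRange 1 N 1).foldl
        (fun a k => PySem.List.pySetD a (N - k)
          (PySem.List.pyGetD a (N - k) 0 + PySem.List.pyGetD a (N - k + 1) 0)) a) arr
    (PySem.List.pyRange 0 (N + 1) 1).foldl
      (fun s j => s + PySem.List.pyGetD arr j 0 * j) SUM

-- ===== PORT B =====
def solve_alt (K : Int) (N : Int) : Int :=
  if N ≤ 0 then 0
  else if K = 1 then PySem.Int.floordiv (N * (N + 1)) 2
  else
    let m : Int := if K > 2 then K - 2 else 0
    let n : Int := N + m + 2
    let k : Int := if m + 3 < N - 1 then m + 3 else N - 1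
    (PySem.List.pyRange 0 k 1).foldl
      (fun r i => PySem.Int.floordiv (r * (n - k + 1 + i)) (i + 1)) 1

-- ===== PRECONDITION & SPEC =====
def Spec_solve (K : Int) (N : Int) (out : Int) : Prop := out = solve_alt K N
instance (K : Int) (N : Int) (out : Int) : Decidable (Spec_solve K N out) := by unfold Spec_solve; infer_instance

-- ===== CLAIM (what is proved, stated in full; the proofs are below) =====
def Claim_equal_solve : Prop := ∀ (K : Int) (N : Int), Dom_solve K N → Spec_solve K N (solve K N)

-- ===== LEMMAS AND PROOFS =====

-- hockey stick, in `range` form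
lemma hockeyR (r L : Nat) :
    ∑ t ∈ Finset.range L, Nat.choose (t + r) r = Nat.choose (L + r) (r + 1) := by
  induction L with
  | zero => simp
  | succ L ih =>
      rw [Finset.sum_range_succ, ih]
      have h : L + 1 + r = (L + r) + 1 := by omega
      rw [h, Nat.choose_succ_succ' (L + r) r]
      omega

lemma revHockey (r L : Nat) :
    ∑ t ∈ Finset.range L, Nat.choose (L - 1 - t + r) r = Nat.choose (L + r) (r + 1) := by
  rw [Finset.sum_range_reflect (fun t => Nat.choose (t + r) r) L]
  exact hockeyR r L

lemma sum2 (r n : Nat) :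
    ∑ i ∈ Finset.range (n + 1), i * Nat.choose (n - i + r) r = Nat.choose (n + r + 1) (r + 2) := by
  induction n with
  | zero => rw [Nat.choose_eq_zero_of_lt (by omega)]; simp
  | succ n ih =>
      rw [Finset.sum_range_succ']
      simp only [show ∀ i : ℕ, n + 1 - (i + 1) + r = n - i + r from fun i => by omega,
        add_mul, one_mul]
      rw [Finset.sum_add_distrib, ih]
      simp only [show ∀ i : ℕ, n - i + r = n + 1 - 1 - i + r from fun i => by omega]
      rw [revHockey r (n + 1)]
      have hRHS : Nat.choose (n + 1 + r + 1) (r + 2)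
          = Nat.choose (n + r + 1) (r + 1) + Nat.choose (n + r + 1) (r + 2) := by
        have e1 : n + 1 + r + 1 = (n + r + 1) + 1 := by omega
        have e2 : r + 2 = (r + 1) + 1 := by omega
        rw [e1, e2, Nat.choose_succ_succ' (n + r + 1) (r + 1)]
      have hB : Nat.choose (n + 1 + r) (r + 1) = Nat.choose (n + r + 1) (r + 1) := by
        congr 1
        omega
      rw [hRHS, hB]
      omega

-- setting an element of a mapped range
lemma set_map_range (g : Nat → Int) (L i : Nat) (v : Int) :
    ((List.range L).map g).set i v = (List.range L).map (fun j => if j = i then v else g j) := by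
  apply List.ext_getElem
  · simp
  · intro j h1 h2
    simp only [List.getElem_set, List.getElem_map, List.getElem_range]
    by_cases h : i = j
    · subst h; simp
    · rw [if_neg h, if_neg (Ne.symm h)]

-- row values after m accumulation passes: index 0 keeps N+1, index i ≥ 1 holds C(n-i+m+1, m+1)
def phi (n m i : Nat) : Int :=
  if i = 0 then (n : Int) + 1 else (Nat.choose (n - i + m + 1) (m + 1) : Int)

def arrState (n m : Nat) : List Int := (List.range (n + 1)).map (phi n m)

-- suffix sum of g over indices i..n
def suf (n : Nat) (g : Nat → Int) (i : Nat) : Int := ∑ t ∈ Finset.range (n + 1 - i), g (i + t)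

lemma suf_last (n : Nat) (g : Nat → Int) : suf n g n = g n := by
  simp [suf]

lemma suf_rec (n : Nat) (g : Nat → Int) (i : Nat) (h : i < n) :
    suf n g i = g i + suf n g (i + 1) := by
  unfold suf
  have h1 : n + 1 - i = (n - i) + 1 := by omega
  have h2 : n + 1 - (i + 1) = n - i := by omega
  rw [h1, h2, Finset.sum_range_succ']
  have hs : ∑ t ∈ Finset.range (n - i), g (i + (t + 1))
      = ∑ t ∈ Finset.range (n - i), g (i + 1 + t) :=
    Finset.sum_congr rfl (fun t _ => by rw [show i + (t + 1) = i + 1 + t by omega])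
  rw [hs]
  simp only [Nat.add_zero]
  exact add_comm _ _

-- the init loop writes N+1-i at every index i it has reached
lemma initAux (n t : Nat) (ht : t ≤ n + 1) :
    (PySem.List.pyRange 0 (t : Int) 1).foldl
        (fun a j => PySem.List.pySetD a ((n : Int) - j) (1 + j)) (List.replicate (n + 1) (0 : Int))
      = (List.range (n + 1)).map (fun i => if n + 1 - t ≤ i then (n : Int) + 1 - i else 0) := by
  induction t with
  | zero =>
      rw [show ((0 : Nat) : Int) = 0 from rfl, PySem.List.pyRange_one_eq_nil (by omega)]
      simp only [List.foldl_nil]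
      apply List.ext_getElem
      · simp
      · intro i h1 h2
        have hi : i < n + 1 := by simpa using h1
        simp only [List.getElem_replicate, List.getElem_map, List.getElem_range]
        rw [if_neg (by omega)]
  | succ t ih =>
      have hcast : ((t + 1 : Nat) : Int) = (t : Int) + 1 := by push_cast; ring
      rw [hcast, PySem.List.pyRange_one_succ_right (by omega), List.foldl_append,
        ih (by omega)]
      simp only [List.foldl_cons, List.foldl_nil]
      have hidx : (n : Int) - (t : Int) = ((n - t : Nat) : Int) := by omega
      rw [hidx, PySem.List.pySetD_natCast, set_map_range]
      apply List.map_congr_left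
      intro i hi
      simp only [List.mem_range] at hi
      by_cases h : i = n - t
      · rw [if_pos h, if_pos (show n + 1 - (t + 1) ≤ i by omega), h]
        omega
      · rw [if_neg h]
        by_cases h2 : n + 1 - t ≤ i
        · rw [if_pos h2, if_pos (by omega)]
        · rw [if_neg h2, if_neg (by omega)]

lemma initA (n : Nat) :
    (PySem.List.pyRange 0 ((n : Int) + 1) 1).foldl
        (fun a j => PySem.List.pySetD a ((n : Int) - j) (1 + j)) (List.replicate (n + 1) (0 : Int))
      = arrState n 0 := by
  have hcast : ((n : Int) + 1) = ((n + 1 : Nat) : Int) := by push_cast; ring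
  rw [hcast, initAux n (n + 1) le_rfl]
  unfold arrState
  apply List.map_congr_left
  intro i hi
  simp only [List.mem_range] at hi
  rw [if_pos (show n + 1 - (n + 1) ≤ i by omega)]
  unfold phi
  by_cases h : i = 0
  · simp [h]
  · rw [if_neg h]
    have h1 : n - i + 0 + 1 = (n - i) + 1 := by omega
    rw [h1, Nat.choose_one_right]
    omega

-- one accumulation pass turns the row values g into suffix sums on indices n-t..n-1
lemma passAux (n : Nat) (hn : 1 ≤ n) (g : Nat → Int) (t : Nat) (ht : t ≤ n - 1) :
    (PySem.List.pyRange 1 (1 + (t : Int)) 1).foldl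
        (fun a k => PySem.List.pySetD a ((n : Int) - k)
          (PySem.List.pyGetD a ((n : Int) - k) 0 + PySem.List.pyGetD a ((n : Int) - k + 1) 0))
        ((List.range (n + 1)).map g)
      = (List.range (n + 1)).map
          (fun i => if n - t ≤ i ∧ i ≤ n - 1 then suf n g i else g i) := by
  induction t with
  | zero =>
      rw [show (1 + ((0 : Nat) : Int)) = 1 by norm_num, PySem.List.pyRange_one_eq_nil (by omega)]
      simp only [List.foldl_nil]
      apply List.map_congr_left
      intro i hi
      simp only [List.mem_range] at hi
      rw [if_neg (by omega)]
  | succ t ih =>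
      have hcast : (1 + ((t + 1 : Nat) : Int)) = (1 + (t : Int)) + 1 := by push_cast; ring
      rw [hcast, PySem.List.pyRange_one_succ_right (by omega), List.foldl_append,
        ih (by omega)]
      simp only [List.foldl_cons, List.foldl_nil]
      have hi1 : (n : Int) - (1 + (t : Int)) = ((n - t - 1 : Nat) : Int) := by omega
      have hi2 : ((n - t - 1 : Nat) : Int) + 1 = ((n - t : Nat) : Int) := by omega
      rw [hi1, hi2, PySem.List.pySetD_natCast, PySem.List.pyGetD_natCast,
        PySem.List.pyGetD_natCast,
        PySem.List.getD_map_range _ _ _ _ (by omega),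
        PySem.List.getD_map_range _ _ _ _ (by omega),
        set_map_range]
      apply List.map_congr_left
      intro i hi
      simp only [List.mem_range] at hi
      by_cases h : i = n - t - 1
      · rw [if_pos h, if_pos (show n - (t + 1) ≤ i ∧ i ≤ n - 1 by omega)]
        rw [if_neg (show ¬(n - t ≤ n - t - 1 ∧ n - t - 1 ≤ n - 1) by omega)]
        have hx : (if n - t ≤ n - t ∧ n - t ≤ n - 1 then suf n g (n - t) else g (n - t))
            = suf n g (n - t) := by
          by_cases hc : n - t ≤ n - 1
          · rw [if_pos ⟨le_rfl, hc⟩]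
          · have hteq : n - t = n := by omega
            rw [if_neg (by omega), hteq, suf_last]
        rw [hx, h, suf_rec n g (n - t - 1) (by omega)]
        have hy : n - t - 1 + 1 = n - t := by omega
        rw [hy]
      · rw [if_neg h]
        by_cases h2 : n - (t + 1) ≤ i ∧ i ≤ n - 1
        · rw [if_pos h2, if_pos (by omega)]
        · rw [if_neg h2, if_neg (by omega)]

lemma suf_phi (n m i : Nat) (h1 : 1 ≤ i) (h2 : i ≤ n) :
    suf n (phi n m) i = (Nat.choose (n - i + m + 2) (m + 2) : Int) := by
  unfold suf
  have hcongr : ∀ t ∈ Finset.range (n + 1 - i), phi n m (i + t)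
      = (Nat.choose ((n + 1 - i) - 1 - t + (m + 1)) (m + 1) : Int) := by
    intro t ht
    simp only [Finset.mem_range] at ht
    unfold phi
    rw [if_neg (by omega)]
    have h : n - (i + t) + m + 1 = (n + 1 - i) - 1 - t + (m + 1) := by omega
    rw [h]
  rw [Finset.sum_congr rfl hcongr, ← Nat.cast_sum, revHockey (m + 1) (n + 1 - i)]
  have h : (n + 1 - i) + (m + 1) = n - i + m + 2 := by omega
  rw [h]

lemma passPhi (n m : Nat) :
    (PySem.List.pyRange 1 (n : Int) 1).foldl
        (fun a k => PySem.List.pySetD a ((n : Int) - k)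
          (PySem.List.pyGetD a ((n : Int) - k) 0 + PySem.List.pyGetD a ((n : Int) - k + 1) 0))
        (arrState n m)
      = arrState n (m + 1) := by
  by_cases hn : n = 0
  · subst hn
    rw [PySem.List.pyRange_one_eq_nil (by omega)]
    simp only [List.foldl_nil]
    unfold arrState
    apply List.map_congr_left
    intro i hi
    simp only [List.mem_range] at hi
    have h : i = 0 := by omega
    simp [h, phi]
  · have hn1 : 1 ≤ n := by omega
    have hb : PySem.List.pyRange 1 (n : Int) 1 = PySem.List.pyRange 1 (1 + ((n - 1 : Nat) : Int)) 1 := by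
      congr 1
      omega
    unfold arrState
    rw [hb, passAux n hn1 (phi n m) (n - 1) le_rfl]
    apply List.map_congr_left
    intro i hi
    simp only [List.mem_range] at hi
    by_cases h : n - (n - 1) ≤ i ∧ i ≤ n - 1
    · rw [if_pos h, suf_phi n m i (by omega) (by omega)]
      unfold phi
      rw [if_neg (by omega)]
      have hx : n - i + (m + 1) + 1 = n - i + m + 2 := by omega
      rw [hx]
    · rw [if_neg h]
      unfold phi
      by_cases h0 : i = 0
      · simp [h0]
      · have hieq : i = n := by omega
        rw [if_neg h0, if_neg h0, hieq]
        simp [Nat.choose_self]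

-- the outer loop applies one pass per element, regardless of the loop variable
lemma iterPass (n : Nat) (l : List Int) (m : Nat) :
    l.foldl (fun a _j => (PySem.List.pyRange 1 (n : Int) 1).foldl
        (fun a k => PySem.List.pySetD a ((n : Int) - k)
          (PySem.List.pyGetD a ((n : Int) - k) 0 + PySem.List.pyGetD a ((n : Int) - k + 1) 0)) a)
        (arrState n m)
      = arrState n (m + l.length) := by
  induction l generalizing m with
  | nil => simp
  | cons x xs ih =>
      rw [List.foldl_cons, passPhi, ih (m + 1), List.length_cons]
      congr 1
      omega

-- the final weighted sum over the table is a single binomial coefficient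
lemma sumFold (n M : Nat) :
    (PySem.List.pyRange 0 ((n : Int) + 1) 1).foldl
        (fun s j => s + PySem.List.pyGetD (arrState n M) j 0 * j) 0
      = (Nat.choose (n + M + 2) (M + 3) : Int) := by
  rw [PySem.List.foldl_add, PySem.List.pyRange_one, List.map_map]
  have hmap : ∀ k ∈ List.range (((n : Int) + 1 - 0)).toNat,
      ((fun j => PySem.List.pyGetD (arrState n M) j 0 * j) ∘ (fun k : Nat => (0 : Int) + k)) k
        = ((Nat.choose (n - k + M + 1) (M + 1) * k : Nat) : Int) := by
    intro k hk
    simp only [List.mem_range] at hk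
    have hk' : k < n + 1 := by omega
    simp only [Function.comp_apply, zero_add]
    rw [PySem.List.pyGetD_natCast]
    unfold arrState
    rw [PySem.List.getD_map_range _ _ _ _ hk']
    unfold phi
    by_cases h : k = 0
    · simp [h]
    · rw [if_neg h]; push_cast; ring
  rw [List.map_congr_left hmap, zero_add]
  have hlen : (((n : Int) + 1 - 0)).toNat = n + 1 := by omega
  rw [hlen]
  have hbridge : ((List.range (n + 1)).map
        (fun k => ((Nat.choose (n - k + M + 1) (M + 1) * k : Nat) : Int))).sum
      = ((∑ i ∈ Finset.range (n + 1), Nat.choose (n - i + M + 1) (M + 1) * i : Nat) : Int) := by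
    rw [Nat.cast_sum]
    rfl
  rw [hbridge]
  have hc : ∀ i ∈ Finset.range (n + 1),
      Nat.choose (n - i + M + 1) (M + 1) * i = i * Nat.choose (n - i + (M + 1)) (M + 1) := by
    intro i _
    rw [Nat.mul_comm]
    have h : n - i + M + 1 = n - i + (M + 1) := by omega
    rw [h]
  rw [Finset.sum_congr rfl hc, sum2 (M + 1) n]
  have h1 : n + (M + 1) + 1 = n + M + 2 := by omega
  have h2 : (M + 1) + 2 = M + 3 := by omega
  rw [h1, h2]

-- B's product loop: the running value is always an exact binomial coefficient
lemma BloopAux (n k t : Nat) (hk : k ≤ n) (ht : t ≤ k) :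
    (PySem.List.pyRange 0 (t : Int) 1).foldl
        (fun r i => PySem.Int.floordiv (r * ((n : Int) - (k : Int) + 1 + i)) (i + 1)) 1
      = (Nat.choose (n - k + t) t : Int) := by
  induction t with
  | zero =>
      rw [show ((0 : Nat) : Int) = 0 from rfl, PySem.List.pyRange_one_eq_nil (by omega)]
      simp
  | succ t ih =>
      have hcast : ((t + 1 : Nat) : Int) = (t : Int) + 1 := by push_cast; ring
      rw [hcast, PySem.List.pyRange_one_succ_right (by omega), List.foldl_append,
        ih (by omega)]
      simp only [List.foldl_cons, List.foldl_nil]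
      have he : (n : Int) - (k : Int) + 1 + (t : Int) = ((n - k + t + 1 : Nat) : Int) := by omega
      rw [he, ← Nat.cast_mul]
      have hm : Nat.choose (n - k + t) t * (n - k + t + 1)
          = Nat.choose (n - k + t + 1) (t + 1) * (t + 1) := by
        rw [Nat.mul_comm]
        simpa [Nat.succ_eq_add_one] using Nat.add_one_mul_choose_eq (n - k + t) t
      rw [hm]
      have htc : ((t : Int) + 1) = ((t + 1 : Nat) : Int) := by push_cast; ring
      rw [htc, PySem.Int.floordiv_natCast, Nat.mul_div_cancel _ (Nat.succ_pos t)]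
      have hz : n - k + t + 1 = n - k + (t + 1) := by omega
      rw [hz]

lemma Bloop' (nI kI : Int) (n k : Nat) (h1 : nI = (n : Int)) (h2 : kI = (k : Int)) (hk : k ≤ n) :
    (PySem.List.pyRange 0 kI 1).foldl
        (fun r i => PySem.Int.floordiv (r * (nI - kI + 1 + i)) (i + 1)) 1
      = (Nat.choose n k : Int) := by
  subst h1
  subst h2
  have h := BloopAux n k k hk le_rfl
  rwa [Nat.sub_add_cancel hk] at h

-- A's whole else-branch in closed form
lemma A_eq (K : Int) (n : Nat) (hK : ¬ K = 1) :
    solve K (n : Int) = (Nat.choose (n + (K - 2).toNat + 2) ((K - 2).toNat + 3) : Int) := by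
  simp only [solve]
  rw [if_neg hK]
  have h1 : ((n : Int) + 1).toNat = n + 1 := by omega
  rw [h1, initA n, iterPass n (PySem.List.pyRange 2 K 1) 0, PySem.List.length_pyRange_one,
    Nat.zero_add, sumFold n (K - 2).toNat]

-- B's product branch in closed form
lemma B_eq (K : Int) (p : Nat) (hK : ¬ K = 1) (hp : 1 ≤ p) :
    solve_alt K (p : Int) = (Nat.choose (p + (K - 2).toNat + 2) ((K - 2).toNat + 3) : Int) := by
  simp only [solve_alt]
  rw [if_neg (show ¬ ((p : Int) ≤ 0) by omega), if_neg hK]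
  have hm : (if K > 2 then K - 2 else 0) = ((K - 2).toNat : Int) := by
    split_ifs <;> omega
  rw [hm]
  by_cases hlt : ((K - 2).toNat : Int) + 3 < (p : Int) - 1
  · rw [if_pos hlt]
    rw [Bloop' ((p : Int) + ((K - 2).toNat : Int) + 2) (((K - 2).toNat : Int) + 3)
      (p + (K - 2).toNat + 2) ((K - 2).toNat + 3) (by push_cast; ring) (by push_cast; ring)
      (by omega)]
  · rw [if_neg hlt]
    rw [Bloop' ((p : Int) + ((K - 2).toNat : Int) + 2) ((p : Int) - 1)
      (p + (K - 2).toNat + 2) (p - 1) (by push_cast; ring) (by omega) (by omega)]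
    have hs := Nat.choose_symm (show (K - 2).toNat + 3 ≤ p + (K - 2).toNat + 2 by omega)
    have hd : p + (K - 2).toNat + 2 - ((K - 2).toNat + 3) = p - 1 := by omega
    rw [hd] at hs
    rw [hs]

-- ===== VERDICT (by name: the statement is the Claim_ definition above) =====
theorem solve_spec : Claim_equal_solve := by
  intro K N _
  unfold Spec_solve
  by_cases hK : K = 1
  · subst hK
    by_cases hN : N ≤ 0
    · have hnil : PySem.List.pyRange 1 (N + 1) 1 = [] :=
        PySem.List.pyRange_one_eq_nil (by omega)
      simp [solve, solve_alt, hnil, hN]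
    · obtain ⟨n, rfl⟩ : ∃ n : Nat, N = (n : Int) := ⟨N.toNat, by omega⟩
      simp only [solve, solve_alt, if_neg hN, if_true]
      rw [PySem.List.foldl_add (g := fun x => x), List.map_id']
      rw [PySem.List.pyRange_one 1 ((n : Int) + 1)]
      have hlen : ((n : Int) + 1 - 1).toNat = n := by omega
      rw [hlen]
      have hmap : (List.range n).map (fun k : Nat => (1 : Int) + k)
          = (List.range n).map (fun k : Nat => ((1 + k : Nat) : Int)) := by
        apply List.map_congr_left
        intro i _
        push_cast
        ring
      rw [hmap]
      have hsum : ((List.range n).map (fun k : Nat => ((1 + k : Nat) : Int))).sum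
          = ((∑ i ∈ Finset.range n, (1 + i) : Nat) : Int) := by
        rw [Nat.cast_sum]
        rfl
      rw [hsum]
      have hshift : (∑ i ∈ Finset.range (n + 1), i) = ∑ i ∈ Finset.range n, (1 + i) := by
        rw [Finset.sum_range_succ' (fun i => i) n]
        simp [add_comm]
      have he : (∑ i ∈ Finset.range n, (1 + i)) * 2 = (n + 1) * n := by
        rw [← hshift, Finset.sum_range_id_mul_two (n + 1)]
        simp
      have hg : (∑ i ∈ Finset.range n, (1 + i)) = n * (n + 1) / 2 := by
        have hcomm : (n + 1) * n = n * (n + 1) := Nat.mul_comm _ _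
        omega
      rw [hg]
      have hN2 : (n : Int) * ((n : Int) + 1) = ((n * (n + 1) : Nat) : Int) := by push_cast; ring
      have h2 : (2 : Int) = ((2 : Nat) : Int) := by norm_num
      simp only [zero_add]
      rw [hN2, h2, PySem.Int.floordiv_natCast]
  · by_cases hN : 0 ≤ N
    · obtain ⟨p, rfl⟩ : ∃ p : Nat, N = (p : Int) := ⟨N.toNat, by omega⟩
      rw [A_eq K p hK]
      by_cases hp : 1 ≤ p
      · rw [B_eq K p hK hp]
      · have hp0 : p = 0 := by omega
        subst hp0
        simp only [solve_alt]
        rw [if_pos (show ((0 : Nat) : Int) ≤ 0 by norm_num)]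
        have hz : Nat.choose (0 + (K - 2).toNat + 2) ((K - 2).toNat + 3) = 0 :=
          Nat.choose_eq_zero_of_lt (by omega)
        rw [hz]
        simp
    · have h1 : PySem.List.pyRange 0 (N + 1) 1 = [] :=
        PySem.List.pyRange_one_eq_nil (by omega)
      simp only [solve, solve_alt]
      rw [if_neg hK, if_neg hK, if_pos (show N ≤ 0 by omega), h1]
      simp
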